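-- pv_equiv track=rewrite | github.com/goliluxa/ege | 5/5-269.py | funk
-- ===== SOURCE A (Python) =====
-- def funk(n):
--     n1 = list(map(int, list(bin(n)[2:])))
--     if n % 2 != 0:
--         n1 = [1] + n1 + [1, 1]
--     else:
--         n1 = [1, 1] + n1 + [0, 0]
--     s = ""
--     for i in n1:
--        s += str(i)
--     return int(s, 2)
-- ===== SOURCE B (Python) =====
-- def funk(n):
--     b = n.bit_length() or 1
--     if n % 2:
--         return (1 << (b + 2)) + 4 * n + 3
--     return (3 << (b + 2)) + 4 * n
-- ===== Notes on version B (the rewrite author's own statement) =====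
-- stated objective: simpler
-- what changed: B replaces A's bin-string parsing, list concatenation, per-digit string building and int(s,2) re-parse with a single closed-form arithmetic expression on the bit length (prepending/appending bits is a shift plus an addition).
import Mathlib
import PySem

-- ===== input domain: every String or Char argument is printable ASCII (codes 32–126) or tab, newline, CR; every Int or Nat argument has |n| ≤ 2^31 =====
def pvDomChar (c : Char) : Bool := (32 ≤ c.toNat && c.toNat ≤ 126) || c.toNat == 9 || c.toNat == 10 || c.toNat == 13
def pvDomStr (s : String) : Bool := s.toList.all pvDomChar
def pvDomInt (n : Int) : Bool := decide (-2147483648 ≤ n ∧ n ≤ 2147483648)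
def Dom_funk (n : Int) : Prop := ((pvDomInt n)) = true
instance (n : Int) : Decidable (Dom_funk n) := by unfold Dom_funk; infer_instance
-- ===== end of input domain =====

-- B changes A's list/string pipeline into one closed-form arithmetic expression on the bit length (objective: simpler).

-- ===== PORT A =====
-- digits of bin(m) for m > 0, most significant first
def pvBinAux (m : Nat) : List Int :=
  if m = 0 then [] else pvBinAux (m / 2) ++ [((m % 2 : Nat) : Int)]

-- list(map(int, list(bin(n)[2:]))) for n ≥ 0 (for n < 0 Python raises ValueError; excluded by Pre_funk)
def pvBinDigits (n : Int) : List Int :=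
  if n = 0 then [0] else pvBinAux n.toNat

def funk (n : Int) : Int :=
  let n1 := pvBinDigits n
  let n1 := if PySem.Int.mod n 2 ≠ 0 then [1] ++ n1 ++ [1, 1] else [1, 1] ++ n1 ++ [0, 0]
  -- the for-loop builds the binary string digit by digit and int(s, 2) reads it back:
  -- ported by hand, exactly Horner evaluation of the digit list in base 2
  n1.foldl (fun acc d => 2 * acc + d) 0

-- ===== PORT B =====
def funk_alt (n : Int) : Int :=
  let b := if n.natAbs.size = 0 then 1 else n.natAbs.size   -- n.bit_length() or 1
  if PySem.Int.mod n 2 ≠ 0 then (1 : Int) <<< (b + 2) + 4 * n + 3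
  else (3 : Int) <<< (b + 2) + 4 * n

-- ===== PRECONDITION & SPEC =====
-- Pre_ excludes n < 0, where A raises ValueError (bin(-5)[2:] = 'b101' and int('b') fails).
def Pre_funk (n : Int) : Prop := 0 ≤ n
instance (n : Int) : Decidable (Pre_funk n) := by unfold Pre_funk; infer_instance
def pvWitness_funk : Int := (5)

def Spec_funk (n : Int) (out : Int) : Prop := out = funk_alt n
instance (n : Int) (out : Int) : Decidable (Spec_funk n out) := by unfold Spec_funk; infer_instance

-- ===== CLAIM (what is proved, stated in full; the proofs are below) =====
def Claim_equal_funk : Prop := ∀ (n : Int), Dom_funk n → Pre_funk n → Spec_funk n (funk n)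

-- ===== LEMMAS AND PROOFS =====

-- Horner step with an arbitrary accumulator
theorem pv_foldl_acc (L : List Int) : ∀ a : Int,
    L.foldl (fun acc d => 2 * acc + d) a
      = a * 2 ^ L.length + L.foldl (fun acc d => 2 * acc + d) 0 := by
  induction L with
  | nil => intro a; simp
  | cons d L ih =>
    intro a
    simp only [List.foldl_cons, List.length_cons]
    rw [ih (2 * a + d), ih (2 * 0 + d)]
    ring

-- the binary digit list of m evaluates back to m
theorem pv_val_binAux (m : Nat) :
    (pvBinAux m).foldl (fun acc d => 2 * acc + d) 0 = (m : Int) := by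
  induction m using Nat.strong_induction_on with
  | _ m ih =>
    rw [pvBinAux]
    by_cases h : m = 0
    · simp [h]
    · simp only [h, if_false, List.foldl_append]
      rw [pv_foldl_acc [((m % 2 : Nat) : Int)] _]
      simp only [List.foldl, List.length]
      rw [ih (m / 2) (Nat.div_lt_self (Nat.pos_of_ne_zero h) one_lt_two)]
      push_cast
      omega

-- size m = size (m/2) + 1 for m > 0
theorem pv_size_div2 (m : Nat) (h : 0 < m) : Nat.size m = Nat.size (m / 2) + 1 := by
  apply le_antisymm
  · rw [Nat.size_le]
    have := Nat.lt_size_self (m / 2)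
    calc m < 2 * (m / 2) + 2 := by omega
    _ ≤ 2 * 2 ^ Nat.size (m / 2) := by omega
    _ = 2 ^ (Nat.size (m / 2) + 1) := by ring
  · rcases Nat.eq_zero_or_pos (m / 2) with h2 | h2
    · simpa [h2] using Nat.size_pos.mpr h
    · have h3 : Nat.size (m / 2) < Nat.size m := by
        rw [Nat.lt_size]
        have hs : 0 < Nat.size (m / 2) := Nat.size_pos.mpr h2
        have h4 : 2 ^ (Nat.size (m / 2) - 1) ≤ m / 2 := by
          rw [← Nat.lt_size]; omega
        calc 2 ^ Nat.size (m / 2) = 2 * 2 ^ (Nat.size (m / 2) - 1) := by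
              rw [← pow_succ']; congr 1; omega
        _ ≤ 2 * (m / 2) := by omega
        _ ≤ m := by omega
      omega

-- the digit list has length size m
theorem pv_len_binAux (m : Nat) : (pvBinAux m).length = Nat.size m := by
  induction m using Nat.strong_induction_on with
  | _ m ih =>
    rw [pvBinAux]
    by_cases h : m = 0
    · simp [h, Nat.size_zero]
    · simp only [h, if_false, List.length_append, List.length]
      rw [ih (m / 2) (Nat.div_lt_self (Nat.pos_of_ne_zero h) one_lt_two),
        pv_size_div2 m (Nat.pos_of_ne_zero h)]

-- ===== VERDICT (by name: the statement is the Claim_ definition above) =====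
theorem funk_spec : Claim_equal_funk := by
  intro n _ hpre
  have hpre' : (0 : Int) ≤ n := hpre
  unfold Spec_funk funk funk_alt pvBinDigits
  by_cases h0 : n = 0
  · subst h0; decide
  · have hm : 0 < n.toNat := by omega
    have hcast : ((n.toNat : Nat) : Int) = n := Int.toNat_of_nonneg hpre'
    have habs : n.natAbs = n.toNat := by omega
    have hsz : n.toNat.size ≠ 0 := fun hc => absurd (Nat.size_eq_zero.mp hc) (by omega)
    have hval : (pvBinAux n.toNat).foldl (fun acc d => 2 * acc + d) 0 = n := by
      rw [pv_val_binAux, hcast]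
    have hpow : (2 : Int) ^ (n.toNat.size + 2) = 4 * 2 ^ n.toNat.size := by
      rw [pow_add]; ring
    simp only [h0, if_false, habs, hsz]
    by_cases hodd : PySem.Int.mod n 2 ≠ 0
    · rw [if_pos hodd, if_pos hodd]
      simp only [List.cons_append, List.nil_append, List.foldl_cons, List.foldl_append,
        List.foldl_nil]
      rw [pv_foldl_acc (pvBinAux n.toNat), pv_len_binAux, hval, Int.shiftLeft_eq, hpow]
      ring
    · rw [if_neg hodd, if_neg hodd]
      simp only [List.cons_append, List.nil_append, List.foldl_cons, List.foldl_append,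
        List.foldl_nil]
      rw [pv_foldl_acc (pvBinAux n.toNat), pv_len_binAux, hval, Int.shiftLeft_eq, hpow]
      ring
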